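-- pv_equiv track=rewrite | github.com/Tamarmic/deep_learning | assigment_2/data_utils.py | build_prefix_suffix_vocab
-- ===== SOURCE A (Python) =====
-- PAD_TOKEN = "<PAD>"
--
-- UNK_TOKEN = "<UNK>"
--
-- def build_prefix_suffix_vocab(data):
--     prefix2idx = {PAD_TOKEN: 0, UNK_TOKEN: 1}
--     suffix2idx = {PAD_TOKEN: 0, UNK_TOKEN: 1}
--
--     for sentence in data:
--         for word, _ in sentence:
--             prefix = word[:3]
--             suffix = word[-3:]
--             if prefix not in prefix2idx:
--                 prefix2idx[prefix] = len(prefix2idx)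
--             if suffix not in suffix2idx:
--                 suffix2idx[suffix] = len(suffix2idx)
--     return prefix2idx, suffix2idx
-- ===== SOURCE B (Python) =====
-- PAD_TOKEN = "<PAD>"
--
-- UNK_TOKEN = "<UNK>"
--
-- def build_prefix_suffix_vocab(data):
--     words = [word for sentence in data for word, _ in sentence]
--     prefixes = dict.fromkeys(word[:3] for word in words)
--     suffixes = dict.fromkeys(word[-3:] for word in words)
--     prefix2idx = {PAD_TOKEN: 0, UNK_TOKEN: 1}
--     prefix2idx.update({p: i + 2 for i, p in enumerate(prefixes)})
--     suffix2idx = {PAD_TOKEN: 0, UNK_TOKEN: 1}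
--     suffix2idx.update({s: i + 2 for i, s in enumerate(suffixes)})
--     return prefix2idx, suffix2idx
-- ===== Notes on version B (the rewrite author's own statement) =====
-- stated objective: idiomatic
-- what changed: B collects all words once, builds the ordered-unique prefix/suffix lists with dict.fromkeys, and creates each vocab by enumerating that deduplicated list (offset by 2 after PAD/UNK), replacing A's incremental if-not-in insertions with growing dict lengths.
import Mathlib
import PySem

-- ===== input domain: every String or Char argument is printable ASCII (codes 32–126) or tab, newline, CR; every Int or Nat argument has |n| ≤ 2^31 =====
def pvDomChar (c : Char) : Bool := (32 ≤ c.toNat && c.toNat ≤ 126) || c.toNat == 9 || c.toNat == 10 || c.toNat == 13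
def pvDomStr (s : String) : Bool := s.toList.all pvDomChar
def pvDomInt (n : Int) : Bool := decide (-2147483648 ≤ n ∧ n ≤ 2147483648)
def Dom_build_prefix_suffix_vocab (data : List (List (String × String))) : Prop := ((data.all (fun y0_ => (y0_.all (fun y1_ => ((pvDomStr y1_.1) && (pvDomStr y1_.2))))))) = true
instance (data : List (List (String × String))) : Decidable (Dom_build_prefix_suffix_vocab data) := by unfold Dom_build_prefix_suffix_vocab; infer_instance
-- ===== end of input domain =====

-- B replaces A's incremental if-not-in dict insertions by: collect words, ordered-dedup the
-- prefixes/suffixes (dict.fromkeys), and enumerate that list offset by 2 after PAD/UNK (idiomatic).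

-- shared helpers: word[:3] and word[-3:]
def pyPrefix (w : String) : String := PySem.Str.slice w none (some 3)
def pySuffix (w : String) : String := PySem.Str.slice w (some (-3)) none

-- ===== PORT A =====
def build_prefix_suffix_vocab (data : List (List (String × String))) : (List (String × Int)) × (List (String × Int)) :=
  let init : PySem.Dict String Int × PySem.Dict String Int :=
    (PySem.Dict.ofList [("<PAD>", 0), ("<UNK>", 1)], PySem.Dict.ofList [("<PAD>", 0), ("<UNK>", 1)])
  let final := data.foldl (fun st sentence =>
    sentence.foldl (fun st wp =>
      let word := wp.1
      let pre := pyPrefix word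
      let suf := pySuffix word
      let p := if st.1.contains pre then st.1 else st.1.insert pre (st.1.size : Int)
      let s := if st.2.contains suf then st.2 else st.2.insert suf (st.2.size : Int)
      (p, s)) st) init
  (final.1.items, final.2.items)

-- ===== PORT B =====
def build_prefix_suffix_vocab_alt (data : List (List (String × String))) : (List (String × Int)) × (List (String × Int)) :=
  let words := data.flatMap (fun sentence => sentence.map (fun wp => wp.1))
  let prefixes := PySem.List.dedup (words.map pyPrefix)
  let suffixes := PySem.List.dedup (words.map pySuffix)
  let base : PySem.Dict String Int := PySem.Dict.ofList [("<PAD>", 0), ("<UNK>", 1)]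
  let prefix2idx := (PySem.List.enumerate prefixes 0).foldl (fun d p => d.insert p.2 (p.1 + 2)) base
  let suffix2idx := (PySem.List.enumerate suffixes 0).foldl (fun d p => d.insert p.2 (p.1 + 2)) base
  (prefix2idx.items, suffix2idx.items)

-- ===== PRECONDITION & SPEC =====
def Spec_build_prefix_suffix_vocab (data : List (List (String × String))) (out : (List (String × Int)) × (List (String × Int))) : Prop := out = build_prefix_suffix_vocab_alt data
instance (data : List (List (String × String))) (out : (List (String × Int)) × (List (String × Int))) : Decidable (Spec_build_prefix_suffix_vocab data out) := by unfold Spec_build_prefix_suffix_vocab; infer_instance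

-- ===== CLAIM (what is proved, stated in full; the proofs are below) =====
def Claim_equal_build_prefix_suffix_vocab : Prop := ∀ (data : List (List (String × String))), Dom_build_prefix_suffix_vocab data → Spec_build_prefix_suffix_vocab data (build_prefix_suffix_vocab data)

-- ===== LEMMAS AND PROOFS =====
-- A's per-dict step: insert the key with the current size if absent
def stepD (d : PySem.Dict String Int) (k : String) : PySem.Dict String Int :=
  if d.contains k then d else d.insert k (d.size : Int)

-- the fresh items A's loop appends
def freshItems (d : PySem.Dict String Int) : List String → List (String × Int)
  | [] => []
  | k :: ks =>
      if d.contains k then freshItems d ks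
      else (k, (d.size : Int)) :: freshItems (d.insert k (d.size : Int)) ks

theorem foldl_stepD_items (ks : List String) (d : PySem.Dict String Int) :
    (ks.foldl stepD d).items = d.items ++ freshItems d ks := by
  induction ks generalizing d with
  | nil => simp [freshItems]
  | cons k ks ih =>
    by_cases h : d.contains k
    · simp [List.foldl_cons, stepD, h, freshItems, ih]
    · simp only [List.foldl_cons, stepD, h, if_neg, Bool.false_eq_true, not_false_iff,
        freshItems]
      rw [ih, PySem.Dict.items_insert]
      simp [h]

theorem freshItems_eq (ks : List String) (d : PySem.Dict String Int) (s : PySem.Set String)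
    (h : ∀ k ∈ ks, d.contains k = PySem.Set.contains s k) :
    freshItems d ks =
      (PySem.List.enumerate ((PySem.Set.update s ks).drop s.length) (d.size : Int)).map
        (fun p => (p.2, p.1)) := by
  induction ks generalizing d s with
  | nil => simp [freshItems, PySem.Set.update]
  | cons k ks ih =>
    have hupd : PySem.Set.update s (k :: ks) = PySem.Set.update (PySem.Set.add s k) ks := by
      simp [PySem.Set.update]
    by_cases hk : PySem.Set.contains s k = true
    · have hdk : d.contains k = true := by rw [h k (by simp)]; exact hk
      have hadd : PySem.Set.add s k = s := by simp [PySem.Set.add, (PySem.Set.contains_iff s k).mp hk]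
      rw [freshItems, if_pos hdk, hupd, hadd, ih d s (fun k' hk' => h k' (by simp [hk']))]
    · have hdk : d.contains k = false := by rw [h k (by simp)]; simpa using hk
      have hadd : PySem.Set.add s k = s ++ [k] := by
        simp only [PySem.Set.add]
        rw [if_neg (by simpa using hk)]
      rw [freshItems, if_neg (by simp [hdk]), hupd, hadd]
      have hpre : ∃ rest, PySem.Set.update (s ++ [k]) ks = (s ++ [k]) ++ rest := by
        exact ⟨_, PySem.Set.update_eq_append_filter _ _⟩
      obtain ⟨rest, hrest⟩ := hpre
      have hih := ih (d.insert k (d.size : Int)) (s ++ [k]) (fun k' hk' => by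
        rw [PySem.Dict.contains_insert]
        simp only [PySem.Set.contains_eq_listContains] at h ⊢
        rw [h k' (by simp [hk'])]
        by_cases hkk : k' = k
        · simp [hkk]
        · simp [hkk]
        )
      rw [hih, hrest]
      have hdrop1 : ((s ++ [k]) ++ rest).drop s.length = k :: rest := by
        rw [List.append_assoc, List.drop_left]
        simp
      have hdrop2 : ((s ++ [k]) ++ rest).drop (s ++ [k]).length = rest := List.drop_left
      rw [hdrop1, hdrop2, PySem.List.enumerate_cons]
      have hsz : ((d.insert k (d.size : Int)).size : Int) = (d.size : Int) + 1 := by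
        rw [PySem.Dict.size_insert]
        simp [hdk]
      simp [hsz]

-- enumerate with shifted start
theorem enumerate_shift {α : Type} (xs : List α) (a b : Int) :
    PySem.List.enumerate xs (a + b) = (PySem.List.enumerate xs b).map (fun p => (p.1 + a, p.2)) := by
  induction xs generalizing b with
  | nil => simp
  | cons x xs ih =>
    rw [PySem.List.enumerate_cons, PySem.List.enumerate_cons]
    have : a + b + 1 = a + (b + 1) := by ring
    rw [List.map_cons, this, ih (b + 1)]
    simp [add_comm]

def base0 : PySem.Dict String Int := PySem.Dict.ofList [("<PAD>", 0), ("<UNK>", 1)]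

theorem base0_contains (k : String) (hk : k.toList.length ≤ 3) : base0.contains k = false := by
  have h1 : k ≠ "<PAD>" := by intro h; subst h; exact absurd hk (by decide)
  have h2 : k ≠ "<UNK>" := by intro h; subst h; exact absurd hk (by decide)
  have hkeys : base0.keys = ["<PAD>", "<UNK>"] := by decide
  rw [PySem.Dict.contains_eq_decide_mem_keys, hkeys]
  simp [h1, h2]

theorem len_pyPrefix (w : String) : (pyPrefix w).toList.length ≤ 3 := by
  simp [pyPrefix, pysem]

theorem len_pySuffix (w : String) : (pySuffix w).toList.length ≤ 3 := by
  simp [pySuffix, pysem]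
  omega

-- one vocab side: A's fold equals B's enumerate-of-dedup construction
theorem side_eq (ks : List String) (hlen : ∀ k ∈ ks, k.toList.length ≤ 3) :
    (ks.foldl stepD base0).items =
      ((PySem.List.enumerate (PySem.List.dedup ks) 0).foldl
        (fun d p => d.insert p.2 (p.1 + 2)) base0).items := by
  have hfresh : ∀ a ∈ PySem.List.enumerate (PySem.List.dedup ks) 0,
      base0.contains a.2 = false := by
    intro a ha
    have hmem : a.2 ∈ PySem.List.dedup ks := by
      have hsnd := PySem.List.map_snd_enumerate (PySem.List.dedup ks) 0
      exact hsnd ▸ List.mem_map_of_mem ha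
    rw [PySem.List.mem_dedup] at hmem
    exact base0_contains _ (hlen _ hmem)
  have hnd : (List.map (fun p => p.2) (PySem.List.enumerate (PySem.List.dedup ks) 0)).Nodup := by
    rw [PySem.List.map_snd_enumerate]
    exact PySem.List.nodup_dedup _
  rw [foldl_stepD_items,
    freshItems_eq ks base0 [] (fun k hk => by simp [base0_contains k (hlen k hk)]),
    PySem.Dict.items_foldl_insert_fresh (PySem.List.enumerate (PySem.List.dedup ks) 0)
      (fun p => p.2) (fun p => p.1 + 2) base0 hfresh hnd,
    PySem.Set.update_nil_left]
  have hsz : (base0.size : Int) = 2 + 0 := by decide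
  rw [List.length_nil, List.drop_zero, ← PySem.List.dedup_eq_ofList, hsz, enumerate_shift]
  simp [List.map_map, Function.comp_def]

-- split the pair-state fold into two independent folds
theorem pair_split (ws : List String) (p s : PySem.Dict String Int) :
    ws.foldl (fun st w => (stepD st.1 (pyPrefix w), stepD st.2 (pySuffix w))) (p, s) =
      (ws.foldl (fun d w => stepD d (pyPrefix w)) p, ws.foldl (fun d w => stepD d (pySuffix w)) s) := by
  induction ws generalizing p s with
  | nil => rfl
  | cons w ws ih => simp [List.foldl_cons, ih]

-- flatten the sentence/word nested fold into a fold over all words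
theorem nested_flat {σ : Type} (data : List (List (String × String))) (st : σ) (F : σ → String → σ) :
    data.foldl (fun st sent => sent.foldl (fun st wp => F st wp.1) st) st =
      (data.flatMap (fun s => s.map (fun wp => wp.1))).foldl F st := by
  induction data generalizing st with
  | nil => rfl
  | cons sent rest ih =>
    rw [List.foldl_cons, List.flatMap_cons, List.foldl_append, ih, List.foldl_map]

-- ===== VERDICT (by name: the statement is the Claim_ definition above) =====
theorem build_prefix_suffix_vocab_spec : Claim_equal_build_prefix_suffix_vocab := by
  intro data _
  unfold Spec_build_prefix_suffix_vocab
  show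
    (((data.foldl (fun st sent => sent.foldl (fun st wp =>
        (stepD st.1 (pyPrefix wp.1), stepD st.2 (pySuffix wp.1))) st) (base0, base0)).1.items,
      (data.foldl (fun st sent => sent.foldl (fun st wp =>
        (stepD st.1 (pyPrefix wp.1), stepD st.2 (pySuffix wp.1))) st) (base0, base0)).2.items) :
      (List (String × Int)) × (List (String × Int))) =
    (((PySem.List.enumerate (PySem.List.dedup
        ((data.flatMap (fun s => s.map (fun wp => wp.1))).map pyPrefix)) 0).foldl
        (fun d p => d.insert p.2 (p.1 + 2)) base0).items,
     ((PySem.List.enumerate (PySem.List.dedup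
        ((data.flatMap (fun s => s.map (fun wp => wp.1))).map pySuffix)) 0).foldl
        (fun d p => d.insert p.2 (p.1 + 2)) base0).items)
  rw [nested_flat data (base0, base0)
      (fun st w => (stepD st.1 (pyPrefix w), stepD st.2 (pySuffix w))), pair_split,
    ← List.foldl_map (f := pyPrefix) (g := stepD), ← List.foldl_map (f := pySuffix) (g := stepD),
    side_eq _ (fun k hk => by
      obtain ⟨w, _, rfl⟩ := List.mem_map.mp hk
      exact len_pyPrefix w),
    side_eq _ (fun k hk => by
      obtain ⟨w, _, rfl⟩ := List.mem_map.mp hk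
      exact len_pySuffix w)]
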